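-- pv_equiv track=rewrite | github.com/m1nnh/Tech-Interview-QnA | Algorithm/Level2/괄호 변환.py | div_patch
-- ===== SOURCE A (Python) =====
-- from collections import deque
--
-- def div_patch(p):
--     queue = deque(p)
--     left, right = 0, 0
--     u = ""
--
--     while queue:
--         u += queue.popleft()
--
--         if u[-1] == "(":
--             left += 1
--         else:
--             right += 1
--
--         if left == right:
--             break
--
--     v = "".join(list(queue))
--
--     return u, v
-- ===== SOURCE B (Python) =====
-- def div_patch(p):
--     bal = 0
--     for i, c in enumerate(p):
--         bal += 1 if c == "(" else -1
--         if bal == 0: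
--             return p[:i + 1], p[i + 1:]
--     return p, ""
-- ===== Notes on version B (the rewrite author's own statement) =====
-- stated objective: faster
-- what changed: Replace the deque-popleft loop that grows u by string concatenation and joins the leftover queue with a single indexed scan of one balance counter that slices the string at the first zero balance.
import Mathlib
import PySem

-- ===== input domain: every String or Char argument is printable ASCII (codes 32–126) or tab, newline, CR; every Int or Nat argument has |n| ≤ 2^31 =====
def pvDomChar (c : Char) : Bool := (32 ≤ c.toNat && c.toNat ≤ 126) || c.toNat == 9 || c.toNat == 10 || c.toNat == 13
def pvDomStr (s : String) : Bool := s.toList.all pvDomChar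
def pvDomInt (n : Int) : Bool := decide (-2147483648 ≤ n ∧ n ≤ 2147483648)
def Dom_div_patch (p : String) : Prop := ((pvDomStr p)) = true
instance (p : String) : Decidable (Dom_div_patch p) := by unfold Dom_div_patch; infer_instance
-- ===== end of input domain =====

-- B replaces A's deque/concatenation loop by one balance-counter scan with a final slice (faster).
-- ===== PORT A =====
-- while queue: u += queue.popleft(); count '(' as left else right; break when left == right
def divA_loop : List Char → Int → Int → List Char → (List Char × List Char)
  | [], _, _, u => (u, [])
  | c :: q, l, r, u =>
    if c == '(' then
      if l + 1 == r then (u ++ [c], q) else divA_loop q (l + 1) r (u ++ [c])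
    else
      if l == r + 1 then (u ++ [c], q) else divA_loop q l (r + 1) (u ++ [c])

def div_patch (p : String) : List String :=
  let res := divA_loop p.toList 0 0 []
  [String.ofList res.1, String.ofList res.2]

-- ===== PORT B =====
-- for i, c in enumerate(p): bal += ±1; at first bal == 0 return p[:i+1], p[i+1:]
def divB_loop : List Char → Int → Nat → String → List String
  | [], _, _, p => [p, ""]
  | c :: rest, bal, i, p =>
    let bal' := bal + (if c == '(' then (1 : Int) else -1)
    if bal' == 0 then
      [String.ofList (p.toList.take (i + 1)), String.ofList (p.toList.drop (i + 1))]
    else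
      divB_loop rest bal' (i + 1) p

def div_patch_alt (p : String) : List String := divB_loop p.toList 0 0 p

-- ===== PRECONDITION & SPEC =====
def Spec_div_patch (p : String) (out : List String) : Prop := out = div_patch_alt p
instance (p : String) (out : List String) : Decidable (Spec_div_patch p out) := by unfold Spec_div_patch; infer_instance

-- ===== CLAIM (what is proved, stated in full; the proofs are below) =====
def Claim_equal_div_patch : Prop := ∀ (p : String), Dom_div_patch p → Spec_div_patch p (div_patch p)

-- ===== LEMMAS AND PROOFS =====

lemma key (q : List Char) : ∀ (u : List Char) (l r : Int) (p : String),
    p.toList = u ++ q →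
    divB_loop q (l - r) u.length p =
      [String.ofList (divA_loop q l r u).1, String.ofList (divA_loop q l r u).2] := by
  induction q with
  | nil =>
    intro u l r p hp
    have hu : u = p.toList := by simpa using hp.symm
    simp [divA_loop, divB_loop, hu]
  | cons c rest ih =>
    intro u l r p hp
    have htake : p.toList.take (u.length + 1) = u ++ [c] := by
      simp [hp, List.take_append]
    have hdrop : p.toList.drop (u.length + 1) = rest := by
      simp [hp, List.drop_append]
    by_cases hc : c = '('
    · subst hc
      by_cases hb : l + 1 = r
      · have h0 : l - r + 1 = 0 := by omega
        simp [divA_loop, divB_loop, hb, h0, htake, hdrop]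
      · have h0 : ¬ (l - r + 1 = 0) := by omega
        have harith : l - r + 1 = l + 1 - r := by omega
        have := ih (u ++ ['(']) (l + 1) r p (by simp [hp])
        simp only [divA_loop, divB_loop, beq_iff_eq, if_neg hb, reduceIte]
        rw [if_neg h0, harith]
        simpa using this
    · by_cases hb : l = r + 1
      · have h0 : l - r + (-1) = 0 := by omega
        simp [divA_loop, divB_loop, hc, hb,  htake, hdrop]
      · have h0 : ¬ (l - r + (-1) = 0) := by omega
        have harith : l - r + (-1) = l - (r + 1) := by omega
        have := ih (u ++ [c]) l (r + 1) p (by simp [hp])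
        have h0' : ¬ (l - (r + 1) = 0) := by omega
        simp only [divA_loop, divB_loop, beq_iff_eq, if_neg hc, if_neg hb]
        rw [show l - r + (-1) = l - (r + 1) by omega, if_neg h0']
        simpa using this

-- ===== VERDICT (by name: the statement is the Claim_ definition above) =====
theorem div_patch_spec : Claim_equal_div_patch := by
  intro p _
  unfold Spec_div_patch div_patch div_patch_alt
  have := key p.toList [] 0 0 p (by simp)
  simpa using this.symm
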